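-- pv_equiv track=rewrite | github.com/EnesSakalliUniWien/BranchArchitect | brancharchitect/distances/co_clustering_frequencies.py | splits_to_indices
-- ===== SOURCE A (Python) =====
-- from typing import List, Dict, Set
--
-- def split_names_to_indices(split: Set[str], taxa_indices: Dict[str, int]) -> Set[int]:
--     """
--     Convert a set of taxon names to a set of taxon indices.
--     """
--     return set(taxa_indices[t] for t in split if t in taxa_indices)
--
-- def splits_to_indices(splits, index_to_taxon, taxa_indices):
--     """
--     Convert a list of splits (sets of indices) to sets of indices using taxon names and indices.
--     """
--     return [
--         split_names_to_indices(
--             set(index_to_taxon[idx] for idx in split if idx in index_to_taxon),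
--             taxa_indices,
--         )
--         for split in splits
--     ]
-- ===== SOURCE B (Python) =====
-- def splits_to_indices(splits, index_to_taxon, taxa_indices):
--     """
--     Convert a list of splits (sets of indices) to sets of indices using taxon names and indices.
--     """
--     composed = {}
--     for idx, name in index_to_taxon.items():
--         target = taxa_indices.get(name)
--         if target is not None:
--             composed[idx] = target
--     result = []
--     for split in splits:
--         mapped = set()
--         for idx in split:
--             target = composed.get(idx)
--             if target is not None:
--                 mapped.add(target)
--         result.append(mapped)
--     return result
-- ===== Notes on version B (the rewrite author's own statement) =====
-- stated objective: alternative
-- what changed: B is a single imperative pass with explicit accumulators: it first folds index_to_taxon into one composed index-to-index table (replacing A's per-split two-stage pipeline that builds an intermediate name set and looks each name up again), then builds each output set element by element in an explicit loop with .get guards instead of A's nested generator/set comprehensions.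
import Mathlib
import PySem

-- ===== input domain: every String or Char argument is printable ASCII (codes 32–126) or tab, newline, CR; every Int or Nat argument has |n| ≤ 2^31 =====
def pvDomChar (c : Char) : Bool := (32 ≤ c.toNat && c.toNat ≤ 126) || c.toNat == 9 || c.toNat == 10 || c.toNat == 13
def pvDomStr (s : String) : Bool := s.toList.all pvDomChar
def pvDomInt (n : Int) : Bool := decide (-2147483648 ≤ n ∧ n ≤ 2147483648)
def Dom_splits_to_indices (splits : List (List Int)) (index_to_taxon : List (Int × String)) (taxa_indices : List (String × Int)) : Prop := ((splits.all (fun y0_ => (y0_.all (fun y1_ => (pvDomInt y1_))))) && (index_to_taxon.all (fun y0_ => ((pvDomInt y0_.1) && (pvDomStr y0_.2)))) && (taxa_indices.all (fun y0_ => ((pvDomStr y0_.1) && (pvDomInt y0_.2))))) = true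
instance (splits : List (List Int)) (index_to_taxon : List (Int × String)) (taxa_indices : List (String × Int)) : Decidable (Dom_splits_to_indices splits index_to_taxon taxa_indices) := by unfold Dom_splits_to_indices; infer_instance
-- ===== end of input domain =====

-- ===== PORT A =====
-- B replaces A's nested comprehensions (index -> intermediate name set -> index, two lookups
-- per element) by one imperative pass: a composed index-to-index table folded once from
-- index_to_taxon, then explicit accumulator loops building each output set (objective: alternative).

-- set(taxa_indices[t] for t in split if t in taxa_indices)
def split_names_to_indices (split : List String) (taxa_indices : List (String × Int)) : List Int :=
  PySem.Set.ofList (split.filterMap (fun t =>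
    if (PySem.Dict.mk taxa_indices).contains t then (PySem.Dict.mk taxa_indices).get? t else none))

def splits_to_indices (splits : List (List Int)) (index_to_taxon : List (Int × String)) (taxa_indices : List (String × Int)) : List (List Int) :=
  splits.map (fun split =>
    split_names_to_indices
      (PySem.Set.ofList (split.filterMap (fun idx =>
        if (PySem.Dict.mk index_to_taxon).contains idx then (PySem.Dict.mk index_to_taxon).get? idx else none)))
      taxa_indices)

-- ===== PORT B =====
-- composed = {}; for idx, name in index_to_taxon.items(): target = taxa_indices.get(name); if target is not None: composed[idx] = target
-- result = []; for split in splits: mapped = set(); for idx in split: target = composed.get(idx); if target is not None: mapped.add(target); result.append(mapped)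
-- loop bodies of B, named: one step of the composed-table fold / of the set-building loop
def composedStep (taxa_indices : List (String × Int)) (d : PySem.Dict Int Int) (p : Int × String) : PySem.Dict Int Int :=
  match (PySem.Dict.mk taxa_indices).get? p.2 with
  | some target => d.insert p.1 target
  | none => d

def addStep (composed : PySem.Dict Int Int) (mapped : PySem.Set Int) (idx : Int) : PySem.Set Int :=
  match composed.get? idx with
  | some target => PySem.Set.add mapped target
  | none => mapped

def splits_to_indices_alt (splits : List (List Int)) (index_to_taxon : List (Int × String)) (taxa_indices : List (String × Int)) : List (List Int) :=
  let composed : PySem.Dict Int Int :=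
    index_to_taxon.foldl (composedStep taxa_indices) PySem.Dict.empty
  splits.foldl (fun result split =>
    result ++ [split.foldl (addStep composed) PySem.Set.empty]) []

-- ===== PRECONDITION & SPEC =====
-- Pre_ requires the keys of the index_to_taxon association list to be distinct: the list encodes
-- a Python dict (which cannot hold duplicate keys), so duplicate-key lists represent no input A
-- ever receives; Pre_ excludes no input of the Python function.
def Pre_splits_to_indices (splits : List (List Int)) (index_to_taxon : List (Int × String)) (taxa_indices : List (String × Int)) : Prop :=
  (index_to_taxon.map Prod.fst).Nodup
instance (splits : List (List Int)) (index_to_taxon : List (Int × String)) (taxa_indices : List (String × Int)) : Decidable (Pre_splits_to_indices splits index_to_taxon taxa_indices) := by unfold Pre_splits_to_indices; infer_instance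

def pvWitness_splits_to_indices : List (List Int) × (List (Int × String)) × (List (String × Int)) :=
  ([[0, 1], [2], []], [(0, "a"), (1, "b"), (2, "c")], [("a", 10), ("b", 11)])

def Spec_splits_to_indices (splits : List (List Int)) (index_to_taxon : List (Int × String)) (taxa_indices : List (String × Int)) (out : List (List Int)) : Prop := out = splits_to_indices_alt splits index_to_taxon taxa_indices
instance (splits : List (List Int)) (index_to_taxon : List (Int × String)) (taxa_indices : List (String × Int)) (out : List (List Int)) : Decidable (Spec_splits_to_indices splits index_to_taxon taxa_indices out) := by unfold Spec_splits_to_indices; infer_instance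

-- ===== CLAIM (what is proved, stated in full; the proofs are below) =====
def Claim_equal_splits_to_indices : Prop := ∀ (splits : List (List Int)) (index_to_taxon : List (Int × String)) (taxa_indices : List (String × Int)), Dom_splits_to_indices splits index_to_taxon taxa_indices → Pre_splits_to_indices splits index_to_taxon taxa_indices → Spec_splits_to_indices splits index_to_taxon taxa_indices (splits_to_indices splits index_to_taxon taxa_indices)

-- ===== LEMMAS AND PROOFS =====

-- 'd[k] if k in d else skip' is exactly get?
lemma guard_contains_get? {κ ν : Type} [BEq κ] (d : PySem.Dict κ ν) (k : κ) :
    (if d.contains k then d.get? k else none) = d.get? k := by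
  rw [PySem.Dict.contains_eq_isSome_get?]
  cases d.get? k <;> simp

-- deduplicating the inputs before a filterMap does not change the resulting set
lemma ofList_filterMap_ofList {α β : Type} [BEq α] [LawfulBEq α] [BEq β] [LawfulBEq β]
    (h : α → Option β) (xs : List α) :
    PySem.Set.ofList ((PySem.Set.ofList xs).filterMap h) = PySem.Set.ofList (xs.filterMap h) := by
  induction xs using List.reverseRecOn with
  | nil => rfl
  | append_singleton xs x ih =>
    rw [PySem.Set.ofList_append_singleton]
    by_cases hx : x ∈ xs
    · rw [PySem.Set.add_of_mem (by simpa [PySem.Set.mem_ofList] using hx)]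
      rw [ih, List.filterMap_append, PySem.Set.ofList_append]
      cases hv : h x with
      | none => simp [hv, PySem.Set.update_nil]
      | some v =>
        simp only [List.filterMap_cons, hv, List.filterMap_nil]
        rw [PySem.Set.update_cons, PySem.Set.update_nil,
          PySem.Set.add_of_mem (by simp only [PySem.Set.mem_ofList, List.mem_filterMap]; exact ⟨x, hx, hv⟩)]
    · rw [PySem.Set.add_of_not_mem (by simpa [PySem.Set.mem_ofList] using hx)]
      rw [List.filterMap_append, List.filterMap_append, PySem.Set.ofList_append, PySem.Set.ofList_append, ih]

-- the explicit append-accumulator loop over splits is the map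
lemma foldl_append_singleton_eq_map {α β : Type} (f : α → β) :
    ∀ (xs : List α) (acc : List β),
    xs.foldl (fun r x => r ++ [f x]) acc = acc ++ xs.map f := by
  intro xs
  induction xs with
  | nil => simp
  | cons x xs ih => intro acc; simp [List.foldl_cons, ih]

-- the element-by-element set-building loop is the set of the filterMap over get?
lemma foldl_addStep_eq_ofList_filterMap (composed : PySem.Dict Int Int) :
    ∀ (xs : List Int) (l : List Int),
    xs.foldl (addStep composed) (PySem.Set.ofList l)
      = PySem.Set.ofList (l ++ xs.filterMap composed.get?) := by
  intro xs
  induction xs with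
  | nil => simp
  | cons x xs ih =>
    intro l
    simp only [List.foldl_cons]
    cases hv : composed.get? x with
    | none => simpa [addStep, hv] using ih l
    | some v =>
      have hstep : addStep composed (PySem.Set.ofList l) x = (PySem.Set.ofList l).add v := by
        simp [addStep, hv]
      rw [hstep, ← PySem.Set.ofList_append_singleton, ih (l ++ [v])]
      simp [hv]

-- the composed-table fold looks up exactly the chain of the two dicts (keys of l distinct,
-- none of them already present in d)
lemma composed_fold_get? (ti : List (String × Int)) :
    ∀ (l : List (Int × String)) (d : PySem.Dict Int Int), (l.map Prod.fst).Nodup →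
    (∀ k ∈ l.map Prod.fst, d.get? k = none) → ∀ idx : Int,
    (l.foldl (composedStep ti) d).get? idx
      = (match (PySem.Dict.mk l).get? idx with
         | some n => (PySem.Dict.mk ti).get? n
         | none => d.get? idx) := by
  intro l
  induction l with
  | nil => intro d _ _ idx; rfl
  | cons p rest ih =>
    intro d hnd hfresh idx
    simp only [List.map_cons, List.nodup_cons] at hnd
    obtain ⟨hp, hrest⟩ := hnd
    have hfresh' : ∀ k ∈ rest.map Prod.fst, d.get? k = none := by
      intro k hk; exact hfresh k (by simp [hk])
    simp only [List.foldl_cons]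
    cases hv : (PySem.Dict.mk ti).get? p.2 with
    | some target =>
      have hstep : composedStep ti d p = d.insert p.1 target := by simp [composedStep, hv]
      rw [hstep]
      have hfresh2 : ∀ k ∈ rest.map Prod.fst, (d.insert p.1 target).get? k = none := by
        intro k hk
        rw [PySem.Dict.get?_insert]
        have : k ≠ p.1 := fun h => hp (h ▸ hk)
        simp [this, hfresh' k hk]
      refine (ih (d.insert p.1 target) hrest hfresh2 idx).trans ?_
      rw [PySem.Dict.get?_mk_cons]
      by_cases hpi : p.1 = idx
      · subst hpi
        have : (PySem.Dict.mk rest).get? p.1 = none := by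
          rw [PySem.Dict.get?_eq_none_iff_not_mem_keys]
          simpa using hp
        simp [this, hv]
      · have hne : (p.1 == idx) = false := by simpa using hpi
        simp only [hne, Bool.false_eq_true, if_false]
        cases hr : (PySem.Dict.mk rest).get? idx with
        | some n => simp
        | none =>
          have hne2 : idx ≠ p.1 := fun h => hpi h.symm
          simp [PySem.Dict.get?_insert, hne2]
    | none =>
      have hstep : composedStep ti d p = d := by simp [composedStep, hv]
      rw [hstep]
      refine (ih d hrest hfresh' idx).trans ?_
      rw [PySem.Dict.get?_mk_cons]
      by_cases hpi : p.1 = idx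
      · subst hpi
        have : (PySem.Dict.mk rest).get? p.1 = none := by
          rw [PySem.Dict.get?_eq_none_iff_not_mem_keys]
          simpa using hp
        simp [this, hfresh p.1 (by simp), hv]
      · have hne : (p.1 == idx) = false := by simpa using hpi
        simp [hne]

-- ===== VERDICT (by name: the statement is the Claim_ definition above) =====
theorem splits_to_indices_spec : Claim_equal_splits_to_indices := by
  intro splits index_to_taxon taxa_indices _hdom hpre
  unfold Spec_splits_to_indices splits_to_indices splits_to_indices_alt split_names_to_indices
  rw [foldl_append_singleton_eq_map, List.nil_append]
  apply List.map_congr_left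
  intro split _
  rw [show (PySem.Set.empty : PySem.Set Int) = PySem.Set.ofList [] from rfl,
    foldl_addStep_eq_ofList_filterMap, List.nil_append]
  simp only [guard_contains_get?]
  rw [ofList_filterMap_ofList, List.filterMap_filterMap]
  congr 1
  apply List.filterMap_congr
  intro idx _
  rw [composed_fold_get? taxa_indices index_to_taxon PySem.Dict.empty hpre
    (by intro k _; simp [PySem.Dict.get?_empty]) idx]
  cases (PySem.Dict.mk index_to_taxon).get? idx <;> simp [PySem.Dict.get?_empty]
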